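-- pv_equiv track=rewrite | github.com/YoussefFrigui/CodeVuln_GNN | src/fetch_full_files.py | extract_code_from_patch
-- ===== SOURCE A (Python) =====
-- from typing import List, Dict, Any, Optional, Tuple
--
-- def extract_code_from_patch(patch_text: str) -> Tuple[str, str]:
--     """
--     Extract vulnerable (removed) and fixed (added) code from a git patch.
--     Used as fallback when full file fetch fails.
--     """
--     vulnerable_lines = []
--     fixed_lines = []
--
--     for line in patch_text.split('\n'):
--         if line.startswith('@@') or line.startswith('+++') or line.startswith('---'):
--             continue
--
--         if line.startswith('-') and not line.startswith('---'):
--             vulnerable_lines.append(line[1:])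
--         elif line.startswith('+') and not line.startswith('+++'):
--             fixed_lines.append(line[1:])
--         elif line.startswith(' '):
--             vulnerable_lines.append(line[1:])
--             fixed_lines.append(line[1:])
--
--     return '\n'.join(vulnerable_lines).strip(), '\n'.join(fixed_lines).strip()
-- ===== SOURCE B (Python) =====
-- from typing import Tuple
--
-- def extract_code_from_patch(patch_text: str) -> Tuple[str, str]:
--     """Single streaming pass over the characters with a small line-start automaton:
--     no split(), no join over line lists, no startswith prefix tests."""
--     START, V, F, BOTH, SKIP, D1, D2, P1, P2 = range(9)
--     vul = []
--     fix = []
--     has_v = has_f = False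
--     mode = START
--
--     def open_v():
--         nonlocal has_v
--         if has_v:
--             vul.append('\n')
--         has_v = True
--
--     def open_f():
--         nonlocal has_f
--         if has_f:
--             fix.append('\n')
--         has_f = True
--
--     for c in patch_text:
--         if mode == START:
--             if c == '\n':
--                 pass
--             elif c == '-':
--                 mode = D1
--             elif c == '+':
--                 mode = P1
--             elif c == ' ':
--                 open_v()
--                 open_f()
--                 mode = BOTH
--             else:
--                 mode = SKIP
--         elif mode == D1:
--             if c == '\n':
--                 open_v()
--                 mode = START
--             elif c == '-':
--                 mode = D2
--             else:
--                 open_v()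
--                 vul.append(c)
--                 mode = V
--         elif mode == D2:
--             if c == '\n':
--                 open_v()
--                 vul.append('-')
--                 mode = START
--             elif c == '-':
--                 mode = SKIP
--             else:
--                 open_v()
--                 vul.append('-')
--                 vul.append(c)
--                 mode = V
--         elif mode == P1:
--             if c == '\n':
--                 open_f()
--                 mode = START
--             elif c == '+':
--                 mode = P2
--             else:
--                 open_f()
--                 fix.append(c)
--                 mode = F
--         elif mode == P2:
--             if c == '\n':
--                 open_f()
--                 fix.append('+')
--                 mode = START
--             elif c == '+':
--                 mode = SKIP
--             else:
--                 open_f()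
--                 fix.append('+')
--                 fix.append(c)
--                 mode = F
--         elif mode == V:
--             if c == '\n':
--                 mode = START
--             else:
--                 vul.append(c)
--         elif mode == F:
--             if c == '\n':
--                 mode = START
--             else:
--                 fix.append(c)
--         elif mode == BOTH:
--             if c == '\n':
--                 mode = START
--             else:
--                 vul.append(c)
--                 fix.append(c)
--         else:  # SKIP
--             if c == '\n':
--                 mode = START
--     # end of input: a line may end without '\n' while a tag is still pending
--     if mode == D1:
--         open_v()
--     elif mode == D2:
--         open_v()
--         vul.append('-')
--     elif mode == P1:
--         open_f()
--     elif mode == P2: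
--         open_f()
--         fix.append('+')
--     return ''.join(vul).strip(), ''.join(fix).strip()
-- ===== Notes on version B (the rewrite author's own statement) =====
-- stated objective: alternative
-- what changed: Replaced A's split-into-lines-then-classify-by-startswith loop with a single streaming character automaton: one pass over the raw characters with a 9-state machine decided at each line start (never materialising the line list, never calling split/startswith/join over lines), emitting directly into the two output buffers with explicit separator bookkeeping.
import Mathlib
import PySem

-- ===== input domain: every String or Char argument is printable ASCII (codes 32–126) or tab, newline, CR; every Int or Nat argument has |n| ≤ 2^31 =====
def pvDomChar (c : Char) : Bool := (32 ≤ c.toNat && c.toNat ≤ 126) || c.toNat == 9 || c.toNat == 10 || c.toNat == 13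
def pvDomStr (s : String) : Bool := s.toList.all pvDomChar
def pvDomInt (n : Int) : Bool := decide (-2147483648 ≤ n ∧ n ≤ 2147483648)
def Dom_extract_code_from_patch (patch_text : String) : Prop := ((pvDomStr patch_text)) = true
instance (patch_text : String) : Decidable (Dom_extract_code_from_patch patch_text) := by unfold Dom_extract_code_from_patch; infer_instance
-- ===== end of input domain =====

-- B replaces A's split-into-lines-then-classify loop by a single streaming character
-- automaton (a 9-state machine over the raw characters); objective: alternative.

-- ===== PORT A =====
-- the body of A's for-loop: classify one line and append to the two accumulators
def pvStep (acc : List String × List String) (line : String) : List String × List String :=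
  if PySem.Str.startswith line "@@" || PySem.Str.startswith line "+++" || PySem.Str.startswith line "---" then acc
  else if PySem.Str.startswith line "-" && !PySem.Str.startswith line "---" then
    (acc.1 ++ [PySem.Str.slice line (some 1) none], acc.2)
  else if PySem.Str.startswith line "+" && !PySem.Str.startswith line "+++" then
    (acc.1, acc.2 ++ [PySem.Str.slice line (some 1) none])
  else if PySem.Str.startswith line " " then
    (acc.1 ++ [PySem.Str.slice line (some 1) none], acc.2 ++ [PySem.Str.slice line (some 1) none])
  else acc

def extract_code_from_patch (patch_text : String) : String × String :=
  let r := ((PySem.Str.split? patch_text "\n").getD []).foldl pvStep ([], [])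
  (PySem.Str.strip (PySem.Str.join "\n" r.1), PySem.Str.strip (PySem.Str.join "\n" r.2))

-- ===== PORT B =====
-- Source B's automaton modes: START, V, F, BOTH, SKIP, D1, D2, P1, P2
inductive PvMode : Type
  | start | v | f | both | skip | d1 | d2 | p1 | p2
deriving DecidableEq, Repr

-- Source B's mutable state: the two output char buffers and the two has-flags
structure PvSt : Type where
  vul : List Char
  fix : List Char
  hv : Bool
  hf : Bool
deriving DecidableEq, Repr

-- Source B's open_v / open_f
def pvOpenV (st : PvSt) : PvSt :=
  { st with vul := st.vul ++ (if st.hv then ['\n'] else []), hv := true }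
def pvOpenF (st : PvSt) : PvSt :=
  { st with fix := st.fix ++ (if st.hf then ['\n'] else []), hf := true }
-- Source B's vul.append(c) / fix.append(c)
def pvPushV (st : PvSt) (c : Char) : PvSt := { st with vul := st.vul ++ [c] }
def pvPushF (st : PvSt) (c : Char) : PvSt := { st with fix := st.fix ++ [c] }

-- the body of Source B's for-loop
def pvStepB (s : PvMode × PvSt) (c : Char) : PvMode × PvSt :=
  match s with
  | (m, st) =>
    match m with
    | .start =>
      if c = '\n' then (.start, st)
      else if c = '-' then (.d1, st)
      else if c = '+' then (.p1, st)
      else if c = ' ' then (.both, pvOpenF (pvOpenV st))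
      else (.skip, st)
    | .d1 =>
      if c = '\n' then (.start, pvOpenV st)
      else if c = '-' then (.d2, st)
      else (.v, pvPushV (pvOpenV st) c)
    | .d2 =>
      if c = '\n' then (.start, pvPushV (pvOpenV st) '-')
      else if c = '-' then (.skip, st)
      else (.v, pvPushV (pvPushV (pvOpenV st) '-') c)
    | .p1 =>
      if c = '\n' then (.start, pvOpenF st)
      else if c = '+' then (.p2, st)
      else (.f, pvPushF (pvOpenF st) c)
    | .p2 =>
      if c = '\n' then (.start, pvPushF (pvOpenF st) '+')
      else if c = '+' then (.skip, st)
      else (.f, pvPushF (pvPushF (pvOpenF st) '+') c)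
    | .v => if c = '\n' then (.start, st) else (.v, pvPushV st c)
    | .f => if c = '\n' then (.start, st) else (.f, pvPushF st c)
    | .both => if c = '\n' then (.start, st) else (.both, pvPushF (pvPushV st c) c)
    | .skip => if c = '\n' then (.start, st) else (.skip, st)

-- Source B's end-of-input flush of a pending tag-only line
def pvFinish (s : PvMode × PvSt) : PvSt :=
  match s.1 with
  | .d1 => pvOpenV s.2
  | .d2 => pvPushV (pvOpenV s.2) '-'
  | .p1 => pvOpenF s.2
  | .p2 => pvPushF (pvOpenF s.2) '+'
  | _ => s.2

def extract_code_from_patch_alt (patch_text : String) : String × String :=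
  let st := pvFinish (patch_text.toList.foldl pvStepB (.start, ⟨[], [], false, false⟩))
  (PySem.Str.strip (String.ofList st.vul), PySem.Str.strip (String.ofList st.fix))

-- ===== PRECONDITION & SPEC =====
def Spec_extract_code_from_patch (patch_text : String) (out : String × String) : Prop := out = extract_code_from_patch_alt patch_text
instance (patch_text : String) (out : String × String) : Decidable (Spec_extract_code_from_patch patch_text out) := by unfold Spec_extract_code_from_patch; infer_instance

-- ===== CLAIM (what is proved, stated in full; the proofs are below) =====
def Claim_equal_extract_code_from_patch : Prop := ∀ (patch_text : String), Dom_extract_code_from_patch patch_text → Spec_extract_code_from_patch patch_text (extract_code_from_patch patch_text)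

-- ===== LEMMAS AND PROOFS =====

def pvLines : List Char → List (List Char)
  | [] => [[]]
  | c :: r =>
    if c = '\n' then [] :: pvLines r
    else
      match pvLines r with
      | p :: ps => (c :: p) :: ps
      | [] => [[]]

lemma pvLines_ne_nil (s : List Char) : pvLines s ≠ [] := by
  induction s with
  | nil => simp [pvLines]
  | cons c r ih =>
    simp only [pvLines]
    split
    · simp
    · rcases h : pvLines r with _ | ⟨p, ps⟩ <;> simp

lemma pvGo_spec (l : List Char) : ∀ (fuel : Nat) (cur : List Char) (acc : List (List Char)),
    l.length ≤ fuel →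
    PySem.Chars.splitOn.go ['\n'] fuel l cur acc
      = acc.reverse ++ (pvLines l).modifyHead (cur.reverse ++ ·) := by
  induction l with
  | nil =>
    intro fuel cur acc _
    cases fuel <;> simp [PySem.Chars.splitOn.go, pvLines]
  | cons c r ih =>
    intro fuel cur acc hle
    cases fuel with
    | zero => simp at hle
    | succ f =>
      have hlen : r.length ≤ f := by simpa using hle
      by_cases hc : c = '\n'
      · subst hc
        rw [PySem.Chars.splitOn.go]
        have hpre : List.isPrefixOf ['\n'] ('\n' :: r) = true := by
          simp [List.isPrefixOf]
        rw [if_pos hpre]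
        simp only [List.length_cons, List.length_nil, List.drop_succ_cons, List.drop_zero]
        rw [ih f [] ((List.reverse cur) :: acc) hlen]
        simp only [pvLines, List.reverse_cons, List.append_assoc, List.singleton_append,
          List.reverse_nil, List.nil_append, if_pos]
        cases pvLines r <;> simp
      · rw [PySem.Chars.splitOn.go]
        have hpre : List.isPrefixOf ['\n'] (c :: r) = false := by
          simp [List.isPrefixOf]
          intro h; exact absurd h.symm hc
        rw [if_neg (by simp [hpre])]
        rw [ih f (c :: cur) acc hlen]
        have hne := pvLines_ne_nil r
        rcases h : pvLines r with _ | ⟨p, ps⟩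
        · exact absurd h hne
        · simp [pvLines, hc, h]

lemma pvSplitOn_eq (s : List Char) : PySem.Chars.splitOn s ['\n'] = pvLines s := by
  unfold PySem.Chars.splitOn
  rw [pvGo_spec s (s.length + 1) [] [] (by omega)]
  simp
  cases h : pvLines s with
  | nil => exact absurd h (pvLines_ne_nil s)
  | cons p ps => simp

lemma pvIntercalate_cons (sep l : List Char) (ls : List (List Char)) (h : ls ≠ []) :
    List.intercalate sep (l :: ls) = l ++ sep ++ List.intercalate sep ls := by
  rcases ls with _ | ⟨l2, t⟩
  · exact absurd rfl h
  · simp [List.intercalate, List.intersperse]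

lemma pvLines_no_nl (s : List Char) : ∀ l ∈ pvLines s, '\n' ∉ l := by
  induction s with
  | nil => simp [pvLines]
  | cons c r ih =>
    simp only [pvLines]
    by_cases hc : c = '\n'
    · simp [hc]; exact fun l hl => ih l hl
    · rw [if_neg hc]
      rcases h : pvLines r with _ | ⟨p, ps⟩
      · simp
      · intro l hl
        rcases List.mem_cons.mp hl with h1 | h1
        · have hp := ih p (by rw [h]; exact List.mem_cons_self ..)
          subst h1
          simp only [List.mem_cons]
          rintro (h2 | h2)
          · exact hc h2.symm
          · exact hp h2
        · exact ih l (by rw [h]; exact List.mem_cons_of_mem _ h1)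

lemma pvLines_intercalate (s : List Char) : List.intercalate ['\n'] (pvLines s) = s := by
  induction s with
  | nil => simp [pvLines, List.intercalate]
  | cons c r ih =>
    simp only [pvLines]
    by_cases hc : c = '\n'
    · rw [if_pos hc, pvIntercalate_cons _ _ _ (pvLines_ne_nil r)]
      simp [hc, ih]
    · rw [if_neg hc]
      rcases h : pvLines r with _ | ⟨p, ps⟩
      · exact absurd h (pvLines_ne_nil r)
      · rw [h] at ih
        rcases ps with _ | ⟨p2, t⟩
        · simpa [List.intercalate] using ih
        · rw [pvIntercalate_cons _ _ _ (by simp)] at ih ⊢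
          simp_all

def pvVK : List Char → Bool
  | [] => false
  | c :: r =>
    if c = ' ' then true
    else if c = '-' then
      match r with
      | c2 :: c3 :: _ => !(c2 = '-' && c3 = '-')
      | _ => true
    else false
def pvFK : List Char → Bool
  | [] => false
  | c :: r =>
    if c = ' ' then true
    else if c = '+' then
      match r with
      | c2 :: c3 :: _ => !(c2 = '+' && c3 = '+')
      | _ => true
    else false
def pvEmitV (st : PvSt) (b : List Char) : PvSt :=
  { st with vul := st.vul ++ (if st.hv then ['\n'] else []) ++ b, hv := true }
def pvEmitF (st : PvSt) (b : List Char) : PvSt :=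
  { st with fix := st.fix ++ (if st.hf then ['\n'] else []) ++ b, hf := true }
def pvLineEff (st : PvSt) (l : List Char) : PvSt :=
  let st1 := if pvVK l then pvEmitV st l.tail else st
  if pvFK l then pvEmitF st1 l.tail else st1

-- copy-mode runs over newline-free char lists
lemma pvRunV (cs : List Char) : ∀ st, '\n' ∉ cs →
    cs.foldl pvStepB (.v, st) = (.v, { st with vul := st.vul ++ cs }) := by
  induction cs with
  | nil => intro st _; simp
  | cons c r ih =>
    intro st h
    simp only [List.mem_cons, not_or] at h
    have hc : ¬ c = '\n' := fun hh => h.1 (Eq.symm hh)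
    rw [List.foldl_cons]
    show List.foldl pvStepB (pvStepB (.v, st) c) r = _
    rw [show pvStepB (.v, st) c = (.v, pvPushV st c) by simp [pvStepB, hc]]
    rw [ih _ h.2]
    simp [pvPushV]
lemma pvRunF (cs : List Char) : ∀ st, '\n' ∉ cs →
    cs.foldl pvStepB (.f, st) = (.f, { st with fix := st.fix ++ cs }) := by
  induction cs with
  | nil => intro st _; simp
  | cons c r ih =>
    intro st h
    simp only [List.mem_cons, not_or] at h
    have hc : ¬ c = '\n' := fun hh => h.1 (Eq.symm hh)
    rw [List.foldl_cons]
    show List.foldl pvStepB (pvStepB (.f, st) c) r = _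
    rw [show pvStepB (.f, st) c = (.f, pvPushF st c) by simp [pvStepB, hc]]
    rw [ih _ h.2]
    simp [pvPushF]
lemma pvRunB (cs : List Char) : ∀ st, '\n' ∉ cs →
    cs.foldl pvStepB (.both, st) = (.both, { st with vul := st.vul ++ cs, fix := st.fix ++ cs }) := by
  induction cs with
  | nil => intro st _; simp
  | cons c r ih =>
    intro st h
    simp only [List.mem_cons, not_or] at h
    have hc : ¬ c = '\n' := fun hh => h.1 (Eq.symm hh)
    rw [List.foldl_cons]
    show List.foldl pvStepB (pvStepB (.both, st) c) r = _
    rw [show pvStepB (.both, st) c = (.both, pvPushF (pvPushV st c) c) by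
      simp [pvStepB, hc]]
    rw [ih _ h.2]
    simp [pvPushV, pvPushF]
lemma pvRunS (cs : List Char) : ∀ st, '\n' ∉ cs →
    cs.foldl pvStepB (.skip, st) = (.skip, st) := by
  induction cs with
  | nil => intro st _; simp
  | cons c r ih =>
    intro st h
    simp only [List.mem_cons, not_or] at h
    have hc : ¬ c = '\n' := fun hh => h.1 (Eq.symm hh)
    rw [List.foldl_cons]
    show List.foldl pvStepB (pvStepB (.skip, st) c) r = _
    rw [show pvStepB (.skip, st) c = (.skip, st) by simp [pvStepB, hc]]
    exact ih _ h.2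

-- running the machine from line-start over one newline-free line: both end-of-input
-- flush and explicit-'\n' step give the per-line effect
lemma pvLineCore (l : List Char) (st : PvSt) (h : '\n' ∉ l) :
    pvFinish (l.foldl pvStepB (.start, st)) = pvLineEff st l ∧
    pvStepB (l.foldl pvStepB (.start, st)) '\n' = (.start, pvLineEff st l) := by
  rcases l with _ | ⟨c, r⟩
  · constructor <;> simp [pvFinish, pvLineEff, pvVK, pvFK, pvStepB]
  · simp only [List.mem_cons, not_or] at h
    have hc : ¬ c = '\n' := fun hh => h.1 (Eq.symm hh)
    rw [List.foldl_cons]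
    show pvFinish (List.foldl pvStepB (pvStepB (.start, st) c) r) = _ ∧
         pvStepB (List.foldl pvStepB (pvStepB (.start, st) c) r) '\n' = _
    by_cases hsp : c = ' '
    · subst hsp
      rw [show pvStepB (.start, st) ' ' = (.both, pvOpenF (pvOpenV st)) by simp [pvStepB]]
      rw [pvRunB r _ h.2]
      constructor <;>
        simp [pvFinish, pvStepB, pvLineEff, pvVK, pvFK, pvOpenV, pvOpenF, pvEmitV, pvEmitF]
    · by_cases hd : c = '-'
      · subst hd
        rw [show pvStepB (.start, st) '-' = (.d1, st) by simp [pvStepB]]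
        rcases r with _ | ⟨c2, r2⟩
        · constructor <;>
            simp [pvFinish, pvStepB, pvLineEff, pvVK, pvFK, pvOpenV, pvEmitV]
        · simp only [List.mem_cons, not_or] at h
          have hc2 : ¬ c2 = '\n' := fun hh => h.2.1 (Eq.symm hh)
          rw [List.foldl_cons]
          by_cases hd2 : c2 = '-'
          · subst hd2
            rw [show pvStepB (.d1, st) '-' = (.d2, st) by simp [pvStepB]]
            rcases r2 with _ | ⟨c3, r3⟩
            · constructor <;>
                simp [pvFinish, pvStepB, pvLineEff, pvVK, pvFK, pvOpenV, pvPushV, pvEmitV]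
            · simp only [List.mem_cons, not_or] at h
              have hc3 : ¬ c3 = '\n' := fun hh => h.2.2.1 (Eq.symm hh)
              rw [List.foldl_cons]
              by_cases hd3 : c3 = '-'
              · subst hd3
                rw [show pvStepB (.d2, st) '-' = (.skip, st) by simp [pvStepB]]
                rw [pvRunS r3 _ h.2.2.2]
                constructor <;>
                  simp [pvFinish, pvStepB, pvLineEff, pvVK, pvFK]
              · rw [show pvStepB (.d2, st) c3 = (.v, pvPushV (pvPushV (pvOpenV st) '-') c3) by
                  simp [pvStepB, hc3, hd3]]
                rw [pvRunV r3 _ h.2.2.2]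
                constructor <;>
                  simp [pvFinish, pvStepB, pvLineEff, pvVK, pvFK, hd3, pvOpenV, pvPushV, pvEmitV]
          · rw [show pvStepB (.d1, st) c2 = (.v, pvPushV (pvOpenV st) c2) by
              simp [pvStepB, hc2, hd2]]
            rw [pvRunV r2 _ h.2.2]
            constructor <;>
              (rcases r2 with _ | ⟨c3, r3⟩ <;>
                simp [pvFinish, pvStepB, pvLineEff, pvVK, pvFK, hd2, pvOpenV, pvPushV, pvEmitV])
      · by_cases hp : c = '+'
        · subst hp
          rw [show pvStepB (.start, st) '+' = (.p1, st) by simp [pvStepB]]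
          rcases r with _ | ⟨c2, r2⟩
          · constructor <;>
              simp [pvFinish, pvStepB, pvLineEff, pvVK, pvFK, pvOpenF, pvEmitF]
          · simp only [List.mem_cons, not_or] at h
            have hc2 : ¬ c2 = '\n' := fun hh => h.2.1 (Eq.symm hh)
            rw [List.foldl_cons]
            by_cases hd2 : c2 = '+'
            · subst hd2
              rw [show pvStepB (.p1, st) '+' = (.p2, st) by simp [pvStepB]]
              rcases r2 with _ | ⟨c3, r3⟩
              · constructor <;>
                  simp [pvFinish, pvStepB, pvLineEff, pvVK, pvFK, pvOpenF, pvPushF, pvEmitF]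
              · simp only [List.mem_cons, not_or] at h
                have hc3 : ¬ c3 = '\n' := fun hh => h.2.2.1 (Eq.symm hh)
                rw [List.foldl_cons]
                by_cases hd3 : c3 = '+'
                · subst hd3
                  rw [show pvStepB (.p2, st) '+' = (.skip, st) by simp [pvStepB]]
                  rw [pvRunS r3 _ h.2.2.2]
                  constructor <;>
                    simp [pvFinish, pvStepB, pvLineEff, pvVK, pvFK]
                · rw [show pvStepB (.p2, st) c3 = (.f, pvPushF (pvPushF (pvOpenF st) '+') c3) by
                    simp [pvStepB, hc3, hd3]]
                  rw [pvRunF r3 _ h.2.2.2]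
                  constructor <;>
                    simp [pvFinish, pvStepB, pvLineEff, pvVK, pvFK, hd3, pvOpenF, pvPushF, pvEmitF]
            · rw [show pvStepB (.p1, st) c2 = (.f, pvPushF (pvOpenF st) c2) by
                simp [pvStepB, hc2, hd2]]
              rw [pvRunF r2 _ h.2.2]
              constructor <;>
                (rcases r2 with _ | ⟨c3, r3⟩ <;>
                  simp [pvFinish, pvStepB, pvLineEff, pvVK, pvFK, hd2, pvOpenF, pvPushF, pvEmitF])
        · rw [show pvStepB (.start, st) c = (.skip, st) by simp [pvStepB, hc, hd, hp, hsp]]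
          rw [pvRunS r _ h.2]
          constructor <;>
            simp [pvFinish, pvStepB, pvLineEff, pvVK, pvFK, hd, hp, hsp]

-- whole run = fold of the per-line effect over the lines
lemma pvRunLines (lines : List (List Char)) : ∀ st, lines ≠ [] → (∀ l ∈ lines, '\n' ∉ l) →
    pvFinish ((List.intercalate ['\n'] lines).foldl pvStepB (.start, st))
      = lines.foldl pvLineEff st := by
  induction lines with
  | nil => intro st hne _; exact absurd rfl hne
  | cons l t ih =>
    intro st _ hnl
    rcases t with _ | ⟨l2, t2⟩
    · rw [show List.intercalate ['\n'] [l] = l by simp [List.intercalate]]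
      simpa using (pvLineCore l st (hnl l (by simp))).1
    · rw [show List.intercalate ['\n'] (l :: l2 :: t2)
          = (l ++ ['\n']) ++ List.intercalate ['\n'] (l2 :: t2) by
        simp [List.intercalate, List.intersperse]]
      rw [List.foldl_append, List.foldl_append]
      rw [List.foldl_cons, List.foldl_nil]
      rw [(pvLineCore l st (hnl l (by simp))).2]
      rw [ih _ (by simp) (fun x hx => hnl x (List.mem_cons_of_mem _ hx))]
      simp

-- join accumulator: how '\n'.join grows line by line
def pvJoinAcc (acc : List Char × Bool) (b : List Char) : List Char × Bool :=
  (acc.1 ++ (if acc.2 then ['\n'] else []) ++ b, true)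

lemma pvFold_lineEff (lines : List (List Char)) : ∀ st,
    lines.foldl pvLineEff st =
      ⟨(((lines.filter pvVK).map List.tail).foldl pvJoinAcc (st.vul, st.hv)).1,
       (((lines.filter pvFK).map List.tail).foldl pvJoinAcc (st.fix, st.hf)).1,
       (((lines.filter pvVK).map List.tail).foldl pvJoinAcc (st.vul, st.hv)).2,
       (((lines.filter pvFK).map List.tail).foldl pvJoinAcc (st.fix, st.hf)).2⟩ := by
  induction lines with
  | nil => intro st; simp
  | cons l t ih =>
    intro st
    rw [List.foldl_cons]
    rw [ih]
    by_cases h1 : pvVK l <;> by_cases h2 : pvFK l <;>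
      simp [pvLineEff, h1, h2, pvEmitV, pvEmitF, pvJoinAcc]

lemma pvJoinAcc_true (bs : List (List Char)) : ∀ x,
    bs.foldl pvJoinAcc (x, true) = (x ++ bs.flatMap (fun b => '\n' :: b), true) := by
  induction bs with
  | nil => intro x; simp
  | cons b t ih => intro x; rw [List.foldl_cons]; simp [pvJoinAcc, ih]

lemma pvJoinAcc_spec (bs : List (List Char)) :
    (bs.foldl pvJoinAcc ([], false)).1 = List.intercalate ['\n'] bs := by
  rcases bs with _ | ⟨b, t⟩
  · simp [List.intercalate]
  · rw [List.foldl_cons,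
      show pvJoinAcc ([], false) b = (b, true) by simp [pvJoinAcc],
      pvJoinAcc_true]
    induction t generalizing b with
    | nil => simp [List.intercalate]
    | cons b2 t2 ih =>
      rw [show List.intercalate ['\n'] (b :: b2 :: t2)
            = b ++ ['\n'] ++ List.intercalate ['\n'] (b2 :: t2) by
        simp [List.intercalate, List.intersperse]]
      simp only [List.flatMap_cons] at *
      rw [← ih b2]
      simp

-- ===== A-side: A's fold equals two filtered passes (over String lines) =====
def pvVulnLine (l : String) : Bool :=
  (PySem.Str.startswith l "-" && !PySem.Str.startswith l "---") || PySem.Str.startswith l " "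
def pvFixLine (l : String) : Bool :=
  (PySem.Str.startswith l "+" && !PySem.Str.startswith l "+++") || PySem.Str.startswith l " "
def pvTail1 (l : String) : String := PySem.Str.slice l (some 1) none

-- boolean skeleton of A's branch structure vs the two filter conditions
lemma pvBool (acc : List String × List String) (tl : String)
    (b1 b2 b3 b4 b5 b6 : Bool)
    (h34 : b3 = true → b4 = true) (h25 : b2 = true → b5 = true)
    (h1 : b1 = true → b4 = false ∧ b5 = false ∧ b6 = false)
    (h45 : b4 = true → b5 = false ∧ b6 = false)
    (h56 : b5 = true → b6 = false) :
    (if b1 || b2 || b3 then acc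
     else if b4 && !b3 then (acc.1 ++ [tl], acc.2)
     else if b5 && !b2 then (acc.1, acc.2 ++ [tl])
     else if b6 then (acc.1 ++ [tl], acc.2 ++ [tl])
     else acc)
    = (acc.1 ++ (if b4 && !b3 || b6 then [tl] else []),
       acc.2 ++ (if b5 && !b2 || b6 then [tl] else [])) := by
  cases b1 <;> cases b2 <;> cases b3 <;> cases b4 <;> cases b5 <;> cases b6 <;>
    first
    | exact Bool.noConfusion (h34 rfl)
    | exact Bool.noConfusion (h25 rfl)
    | exact Bool.noConfusion (h1 rfl).1
    | exact Bool.noConfusion (h1 rfl).2.1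
    | exact Bool.noConfusion (h1 rfl).2.2
    | exact Bool.noConfusion (h45 rfl).1
    | exact Bool.noConfusion (h45 rfl).2
    | exact Bool.noConfusion (h56 rfl)
    | simp

-- startswith is monotone along prefixes of the pattern
lemma pvswMono (cs p q : List Char) (hpq : p <+: q)
    (h : PySem.Chars.startswith cs q = true) : PySem.Chars.startswith cs p = true := by
  rw [PySem.Chars.startswith_iff] at h ⊢
  exact hpq.trans h

lemma pvswHead (cs : List Char) (x : Char) (r : List Char)
    (h : PySem.Chars.startswith cs (x :: r) = true) : cs.head? = some x := by
  rw [PySem.Chars.startswith_iff] at h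
  rcases h with ⟨t, ht⟩
  rw [← ht]
  rfl

lemma pvswHeadNe (cs : List Char) (x y : Char) (r : List Char)
    (hhead : cs.head? = some x) (hne : y ≠ x) :
    PySem.Chars.startswith cs (y :: r) = false := by
  cases h : PySem.Chars.startswith cs (y :: r) with
  | false => rfl
  | true =>
    have hy := pvswHead cs y r h
    rw [hhead] at hy
    injection hy with hxy
    exact absurd hxy.symm hne

-- one step of A's loop contributes to each side exactly what the filter keeps there
lemma pvStep_eq (acc : List String × List String) (l : String) :
    pvStep acc l =
      (acc.1 ++ (if pvVulnLine l then [pvTail1 l] else []),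
       acc.2 ++ (if pvFixLine l then [pvTail1 l] else [])) := by
  have h34 : PySem.Chars.startswith l.toList "---".toList = true →
      PySem.Chars.startswith l.toList "-".toList = true :=
    fun h => pvswMono l.toList "-".toList "---".toList (by decide) h
  have h25 : PySem.Chars.startswith l.toList "+++".toList = true →
      PySem.Chars.startswith l.toList "+".toList = true :=
    fun h => pvswMono l.toList "+".toList "+++".toList (by decide) h
  have h1 : PySem.Chars.startswith l.toList "@@".toList = true →
      PySem.Chars.startswith l.toList "-".toList = false ∧
      PySem.Chars.startswith l.toList "+".toList = false ∧
      PySem.Chars.startswith l.toList " ".toList = false := by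
    intro h
    have hh : l.toList.head? = some '@' := pvswHead l.toList '@' ['@'] h
    exact ⟨pvswHeadNe l.toList '@' '-' [] hh (by decide),
           pvswHeadNe l.toList '@' '+' [] hh (by decide),
           pvswHeadNe l.toList '@' ' ' [] hh (by decide)⟩
  have h45 : PySem.Chars.startswith l.toList "-".toList = true →
      PySem.Chars.startswith l.toList "+".toList = false ∧
      PySem.Chars.startswith l.toList " ".toList = false := by
    intro h
    have hh : l.toList.head? = some '-' := pvswHead l.toList '-' [] h
    exact ⟨pvswHeadNe l.toList '-' '+' [] hh (by decide),
           pvswHeadNe l.toList '-' ' ' [] hh (by decide)⟩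
  have h56 : PySem.Chars.startswith l.toList "+".toList = true →
      PySem.Chars.startswith l.toList " ".toList = false := by
    intro h
    have hh : l.toList.head? = some '+' := pvswHead l.toList '+' [] h
    exact pvswHeadNe l.toList '+' ' ' [] hh (by decide)
  have key := pvBool acc (PySem.Str.slice l (some 1) none)
    (PySem.Chars.startswith l.toList "@@".toList)
    (PySem.Chars.startswith l.toList "+++".toList)
    (PySem.Chars.startswith l.toList "---".toList)
    (PySem.Chars.startswith l.toList "-".toList)
    (PySem.Chars.startswith l.toList "+".toList)
    (PySem.Chars.startswith l.toList " ".toList)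
    h34 h25 h1 h45 h56
  unfold pvStep pvVulnLine pvFixLine pvTail1
  simp only [PySem.Str.startswith_eq]
  exact key

-- A's whole loop equals two filtered passes, from any starting accumulators
lemma pvLoop_eq (lines v f : List String) :
    lines.foldl pvStep (v, f) =
      (v ++ (lines.filter pvVulnLine).map pvTail1,
       f ++ (lines.filter pvFixLine).map pvTail1) := by
  induction lines generalizing v f with
  | nil => simp
  | cons l t ih =>
    rw [List.foldl_cons, pvStep_eq, ih]
    by_cases h1 : pvVulnLine l <;> by_cases h2 : pvFixLine l <;>
      simp [h1, h2]

-- ===== bridges between the String level (A) and the char level (B) =====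
lemma pvVuln_bridge (l : List Char) : pvVulnLine (String.ofList l) = pvVK l := by
  unfold pvVulnLine pvVK
  simp only [PySem.Str.startswith_eq, String.toList_ofList,
    show "-".toList = ['-'] from rfl, show "---".toList = ['-', '-', '-'] from rfl,
    show " ".toList = [' '] from rfl]
  rcases l with _ | ⟨c, r⟩
  · simp [PySem.Chars.startswith, List.isPrefixOf]
  · by_cases h1 : c = ' '
    · subst h1; simp [PySem.Chars.startswith, List.isPrefixOf]
    · by_cases h2 : c = '-'
      · subst h2
        rcases r with _ | ⟨c2, _ | ⟨c3, r3⟩⟩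
        · simp [PySem.Chars.startswith, List.isPrefixOf]
        · by_cases h3 : c2 = '-' <;>
            simp [PySem.Chars.startswith, List.isPrefixOf, h3, eq_comm]
        · by_cases h3 : c2 = '-' <;> by_cases h4 : c3 = '-' <;>
            [skip;
             (have h4' : ¬ '-' = c3 := fun hh => h4 (Eq.symm hh));
             (have h3' : ¬ '-' = c2 := fun hh => h3 (Eq.symm hh));
             (have h3' : ¬ '-' = c2 := fun hh => h3 (Eq.symm hh))] <;>
            simp_all [PySem.Chars.startswith, List.isPrefixOf]
      · have h1' : ¬ ' ' = c := fun hh => h1 (Eq.symm hh)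
        have h2' : ¬ '-' = c := fun hh => h2 (Eq.symm hh)
        simp [PySem.Chars.startswith, List.isPrefixOf, beq_iff_eq, h1, h2, h1', h2']

lemma pvFix_bridge (l : List Char) : pvFixLine (String.ofList l) = pvFK l := by
  unfold pvFixLine pvFK
  simp only [PySem.Str.startswith_eq, String.toList_ofList,
    show "+".toList = ['+'] from rfl, show "+++".toList = ['+', '+', '+'] from rfl,
    show " ".toList = [' '] from rfl]
  rcases l with _ | ⟨c, r⟩
  · simp [PySem.Chars.startswith, List.isPrefixOf]
  · by_cases h1 : c = ' '
    · subst h1; simp [PySem.Chars.startswith, List.isPrefixOf]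
    · by_cases h2 : c = '+'
      · subst h2
        rcases r with _ | ⟨c2, _ | ⟨c3, r3⟩⟩
        · simp [PySem.Chars.startswith, List.isPrefixOf]
        · by_cases h3 : c2 = '+' <;>
            simp [PySem.Chars.startswith, List.isPrefixOf, h3, eq_comm]
        · by_cases h3 : c2 = '+' <;> by_cases h4 : c3 = '+' <;>
            [skip;
             (have h4' : ¬ '+' = c3 := fun hh => h4 (Eq.symm hh));
             (have h3' : ¬ '+' = c2 := fun hh => h3 (Eq.symm hh));
             (have h3' : ¬ '+' = c2 := fun hh => h3 (Eq.symm hh))] <;>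
            simp_all [PySem.Chars.startswith, List.isPrefixOf]
      · have h1' : ¬ ' ' = c := fun hh => h1 (Eq.symm hh)
        have h2' : ¬ '+' = c := fun hh => h2 (Eq.symm hh)
        simp [PySem.Chars.startswith, List.isPrefixOf, beq_iff_eq, h1, h2, h1', h2']

lemma pvTail_bridge (l : List Char) : (pvTail1 (String.ofList l)).toList = l.tail := by
  unfold pvTail1
  rw [PySem.Str.toList_slice, String.toList_ofList]
  show PySem.List.slice l (some 1) none = l.tail
  rw [PySem.List.slice_from] <;> simp [List.drop_one]

-- ===== final assembly =====
lemma pvStrip_congr (s : String) (y : List Char) (h : s.toList = y) :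
    PySem.Str.strip s = PySem.Str.strip (String.ofList y) := by
  simp [PySem.Str.strip, String.toList_ofList, h]

set_option maxHeartbeats 1000000 in
theorem pvMain (p : String) :
    extract_code_from_patch p = extract_code_from_patch_alt p := by
  simp only [extract_code_from_patch, extract_code_from_patch_alt]
  have hL : (PySem.Str.split? p "\n").getD [] = (pvLines p.toList).map String.ofList := by
    simp [PySem.Str.split?, PySem.Chars.split?, show "\n".toList = ['\n'] from rfl, pvSplitOn_eq]
  rw [hL, pvLoop_eq]
  have hB : pvFinish (p.toList.foldl pvStepB (.start, ⟨[], [], false, false⟩))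
      = (pvLines p.toList).foldl pvLineEff ⟨[], [], false, false⟩ := by
    conv_lhs => rw [← pvLines_intercalate p.toList]
    exact pvRunLines _ _ (pvLines_ne_nil _) (pvLines_no_nl _)
  rw [hB, pvFold_lineEff]
  simp only [List.nil_append]
  have hV : (PySem.Str.join "\n" ((((pvLines p.toList).map String.ofList).filter pvVulnLine).map pvTail1)).toList
      = List.intercalate ['\n'] (((pvLines p.toList).filter pvVK).map List.tail) := by
    rw [PySem.Str.toList_join]
    rw [List.filter_map, show (pvVulnLine ∘ String.ofList) = pvVK from funext pvVuln_bridge]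
    unfold PySem.Chars.join
    rw [show "\n".toList = ['\n'] from rfl]
    congr 1
    rw [List.map_map, List.map_map]
    exact List.map_congr_left (fun l _ => pvTail_bridge l)
  have hF : (PySem.Str.join "\n" ((((pvLines p.toList).map String.ofList).filter pvFixLine).map pvTail1)).toList
      = List.intercalate ['\n'] (((pvLines p.toList).filter pvFK).map List.tail) := by
    rw [PySem.Str.toList_join]
    rw [List.filter_map, show (pvFixLine ∘ String.ofList) = pvFK from funext pvFix_bridge]
    unfold PySem.Chars.join
    rw [show "\n".toList = ['\n'] from rfl]
    congr 1
    rw [List.map_map, List.map_map]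
    exact List.map_congr_left (fun l _ => pvTail_bridge l)
  refine Prod.ext ?_ ?_
  · show PySem.Str.strip _ = PySem.Str.strip (String.ofList _)
    exact pvStrip_congr _ _ (by rw [hV]; exact (pvJoinAcc_spec _).symm)
  · show PySem.Str.strip _ = PySem.Str.strip (String.ofList _)
    exact pvStrip_congr _ _ (by rw [hF]; exact (pvJoinAcc_spec _).symm)

-- ===== VERDICT (by name: the statement is the Claim_ definition above) =====
theorem extract_code_from_patch_spec : Claim_equal_extract_code_from_patch := by
  intro p _
  unfold Spec_extract_code_from_patch
  exact pvMain p
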